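-- pv_equiv track=rewrite | github.com/shivendrasingh456/training | python/small_programs/single_digit_number_sorted_backwords.py | single_digit_numbers
-- ===== SOURCE A (Python) =====
-- from collections import defaultdict
--
-- def single_digit_numbers(l1):
--     l2=[]
--     l1.sort(reverse=True)
--     dict1=defaultdict(int,{
--         1:'one',2:'two',3:'three',
--         4:'four',5:'five',6:'six',
--         7:'seven',8:'eight',9:'nine',
--         0:'zero'
--         })
--     for digit in l1:
--         if dict1[digit]:l2.append(dict1[digit])
--     return l2
-- ===== SOURCE B (Python) =====
-- # Counting sort over the fixed digit alphabet 0-9 instead of a comparison sort: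
-- # count occurrences once, then emit words for 9 down to 0.  (Note: A sorts l1 in
-- # place; B leaves it untouched — the equivalence proved is about the return value.)
-- from collections import Counter
--
-- _WORDS = ['zero', 'one', 'two', 'three', 'four',
--           'five', 'six', 'seven', 'eight', 'nine']
--
-- def single_digit_numbers(l1):
--     cnt = Counter(l1)
--     out = []
--     for d in range(9, -1, -1):
--         out.extend([_WORDS[d]] * cnt[d])
--     return out
-- ===== Notes on version B (the rewrite author's own statement) =====
-- stated objective: faster
-- what changed: Replaced sort-then-map (comparison sort plus a per-element dict-truthiness scan) by a counting sort over the fixed alphabet 0-9: one Counter pass, then one 9-to-0 loop emitting word blocks; B does not mutate l1 (A sorts it in place).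
import Mathlib
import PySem

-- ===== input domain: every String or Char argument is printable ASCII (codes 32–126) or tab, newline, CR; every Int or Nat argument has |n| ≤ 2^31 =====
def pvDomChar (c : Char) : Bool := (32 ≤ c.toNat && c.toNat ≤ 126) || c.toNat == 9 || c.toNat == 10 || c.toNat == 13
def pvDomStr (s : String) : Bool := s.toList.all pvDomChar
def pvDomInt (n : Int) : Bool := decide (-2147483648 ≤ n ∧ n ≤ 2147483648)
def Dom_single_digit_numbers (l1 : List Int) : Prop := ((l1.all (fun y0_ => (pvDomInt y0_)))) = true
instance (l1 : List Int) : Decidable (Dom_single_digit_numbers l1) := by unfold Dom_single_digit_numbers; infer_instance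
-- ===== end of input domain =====

-- B replaces A's comparison sort + per-element dict lookup by a counting sort over the
-- fixed digit alphabet 0-9 (one counting pass, then one 9→0 loop emitting word blocks).
-- A sorts l1 in place; the equivalence proved concerns the RETURN value only.

-- ===== PORT A =====
-- A's defaultdict literal (defaultdict(int): a missing key yields 0, which is falsy;
-- ported as getD with "" — also falsy — exact because A only tests truthiness of the value)
def pvDict1 : PySem.Dict Int String :=
  PySem.Dict.ofList [(1, "one"), (2, "two"), (3, "three"), (4, "four"), (5, "five"),
                     (6, "six"), (7, "seven"), (8, "eight"), (9, "nine"), (0, "zero")]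

def single_digit_numbers (l1 : List Int) : List String :=
  let l1s := PySem.List.sorted l1 (fun x => x) true
  l1s.foldl (fun l2 digit =>
    if PySem.Dict.getD pvDict1 digit "" ≠ "" then
      l2 ++ [PySem.Dict.getD pvDict1 digit ""]
    else l2) []

-- ===== PORT B =====
def pvWords : List String :=
  ["zero", "one", "two", "three", "four", "five", "six", "seven", "eight", "nine"]

def single_digit_numbers_alt (l1 : List Int) : List String :=
  let cnt := PySem.Dict.counter l1
  (PySem.List.pyRange 9 (-1) (-1)).foldl
    (fun out d => out ++ List.replicate (cnt.getD d 0).toNat (pvWords.getD d.toNat "")) []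

-- ===== PRECONDITION & SPEC =====
def Spec_single_digit_numbers (l1 : List Int) (out : List String) : Prop := out = single_digit_numbers_alt l1
instance (l1 : List Int) (out : List String) : Decidable (Spec_single_digit_numbers l1 out) := by unfold Spec_single_digit_numbers; infer_instance

-- ===== CLAIM (what is proved, stated in full; the proofs are below) =====
def Claim_equal_single_digit_numbers : Prop := ∀ (l1 : List Int), Dom_single_digit_numbers l1 → Spec_single_digit_numbers l1 (single_digit_numbers l1)

-- ===== LEMMAS AND PROOFS =====

-- A's dict lookup, characterised: the word for digits 0-9, the (falsy) default elsewhere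
lemma pv_lookup_eq (d : Int) :
    PySem.Dict.getD pvDict1 d "" =
      if 0 ≤ d ∧ d ≤ 9 then pvWords.getD d.toNat "" else "" := by
  by_cases h : 0 ≤ d ∧ d ≤ 9
  · obtain ⟨h0, h9⟩ := h
    interval_cases d <;> decide
  · rw [if_neg h]
    have hmk : pvDict1 = PySem.Dict.mk [(1, "one"), (2, "two"), (3, "three"), (4, "four"),
        (5, "five"), (6, "six"), (7, "seven"), (8, "eight"), (9, "nine"), (0, "zero")] := by rfl
    rw [hmk, PySem.Dict.getD]
    have he : ∀ k : Int, k ≠ d → (k == d) = false := by intro k hk; simp [hk]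
    simp [he 1 (by omega), he 2 (by omega), he 3 (by omega),
      he 4 (by omega), he 5 (by omega), he 6 (by omega), he 7 (by omega), he 8 (by omega),
      he 9 (by omega), he 0 (by omega), PySem.Dict.get?]

lemma pv_word_ne (d : Int) (h : 0 ≤ d ∧ d ≤ 9) : pvWords.getD d.toNat "" ≠ "" := by
  obtain ⟨h0, h9⟩ := h; interval_cases d <;> decide

-- the descending word blocks, at the level of the replicated digits themselves
def pvBlocks (l1 : List Int) (ds : List Int) : List Int :=
  ds.flatMap (fun d => List.replicate (l1.count d) d)

lemma pv_count_blocks (l1 : List Int) (ds : List Int) (hnd : ds.Nodup) (e : Int) :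
    (pvBlocks l1 ds).count e = if e ∈ ds then l1.count e else 0 := by
  induction ds with
  | nil => simp [pvBlocks]
  | cons d t ih =>
    rw [List.nodup_cons] at hnd
    have ih' := ih hnd.2
    simp only [pvBlocks, List.flatMap_cons, List.count_append, List.count_replicate] at *
    by_cases he : e = d
    · subst he
      simp [ih', hnd.1]
    · have : (e == d) = false := by simp [he]
      simp [List.mem_cons, he, ih']
      intro h; omega

lemma pv_pairwise_blocks (l1 : List Int) (ds : List Int)
    (h : ds.Pairwise (· > ·)) :
    (pvBlocks l1 ds).Pairwise (fun a b => b ≤ a) := by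
  induction ds with
  | nil => simp [pvBlocks]
  | cons d t ih =>
    rw [List.pairwise_cons] at h
    simp only [pvBlocks, List.flatMap_cons]
    rw [List.pairwise_append]
    refine ⟨?_, ih h.2, ?_⟩
    · rw [List.pairwise_replicate]; right; exact le_refl d
    · intro a ha b hb
      have ha' : a = d := List.eq_of_mem_replicate ha
      have : ∃ d' ∈ t, b ∈ List.replicate (l1.count d') d' := by
        simpa [pvBlocks, List.mem_flatMap] using hb
      obtain ⟨d', hd', hbd'⟩ := this
      have hb' : b = d' := List.eq_of_mem_replicate hbd'
      have := h.1 d' hd'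
      omega

-- the digits of l1 sorted descending are exactly the 9→0 count blocks
lemma pv_filter_sorted_eq_blocks (l1 : List Int) :
    (PySem.List.sorted l1 (fun x => x) true).filter (fun d => decide (0 ≤ d ∧ d ≤ 9)) =
      pvBlocks l1 (PySem.List.pyRange 9 (-1) (-1)) := by
  have hrev : PySem.List.pyRange 9 (-1) (-1) = (PySem.List.pyRange 0 10).reverse := by
    rw [PySem.List.pyRange_neg_one_eq_reverse]; norm_num
  have hrange_pw : (PySem.List.pyRange 9 (-1) (-1)).Pairwise (· > ·) := by
    rw [hrev, List.pairwise_reverse]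
    exact PySem.List.pairwise_lt_pyRange_one 0 10
  have hrange_nd : (PySem.List.pyRange 9 (-1) (-1)).Nodup := by
    rw [hrev]; exact List.nodup_reverse.mpr (PySem.List.nodup_pyRange_one 0 10)
  apply List.Perm.eq_of_pairwise (le := fun a b => b ≤ a)
  · intro a b _ _ h1 h2; omega
  · exact (PySem.List.sorted_pairwise_rev l1 (fun x => x)).filter _
  · exact pv_pairwise_blocks l1 _ hrange_pw
  · rw [List.perm_iff_count]
    intro e
    rw [pv_count_blocks l1 _ hrange_nd e]
    by_cases he : 0 ≤ e ∧ e ≤ 9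
    · rw [List.count_filter (by simpa using he)]
      rw [if_pos (by rw [PySem.List.mem_pyRange_neg_one]; omega)]
      exact (PySem.List.sorted_perm l1 (fun x => x) true).count_eq e
    · rw [if_neg (by rw [PySem.List.mem_pyRange_neg_one]; omega)]
      rw [List.count_eq_zero]
      intro hmem
      have := List.of_mem_filter hmem
      simp at this; omega

-- ===== VERDICT (by name: the statement is the Claim_ definition above) =====
theorem single_digit_numbers_spec : Claim_equal_single_digit_numbers := by
  intro l1 _
  unfold Spec_single_digit_numbers
  have hstep : (fun (l2 : List String) (digit : Int) =>
      if PySem.Dict.getD pvDict1 digit "" ≠ "" then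
        l2 ++ [PySem.Dict.getD pvDict1 digit ""]
      else l2) = (fun l2 digit =>
      if (fun d => decide (0 ≤ d ∧ d ≤ 9)) digit = true then
        l2 ++ [pvWords.getD digit.toNat ""] else l2) := by
    funext l2 digit
    rw [pv_lookup_eq]
    by_cases h : 0 ≤ digit ∧ digit ≤ 9
    · rw [if_pos h, if_pos (pv_word_ne digit h)]
      have hb : decide (0 ≤ digit ∧ digit ≤ 9) = true := by simpa using h
      simp only [hb, if_true]
    · simp [h]
  rw [single_digit_numbers, single_digit_numbers_alt]
  rw [hstep, PySem.List.foldl_append_if, pv_filter_sorted_eq_blocks,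
      PySem.List.foldl_append_eq_flatMap]
  simp only [List.nil_append, pvBlocks, List.map_flatMap]
  congr 1
  funext d
  rw [List.map_replicate, PySem.Dict.getD_counter]
  simp
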